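-- pv_equiv track=rewrite | github.com/sanchitram1/242b-hw3 | fine_tuning/controlled_prompts.py | infer_ending_label
-- ===== SOURCE A (Python) =====
-- def infer_ending_label(story: str) -> str:
--     stripped = story.strip()
--     final_sentence = stripped.splitlines()[-1].strip().lower()
--     if not final_sentence:
--         return "no special ending"
--     if "happily ever after" in final_sentence:
--         return "end with 'happily ever after'"
--     if "everyone ate cake" in final_sentence:
--         return "end with 'everyone ate cake'"
--     if any(
--         phrase in final_sentence
--         for phrase in ("happy", "best friends", "okay", "proud", "smile", "hug")
--     ):
--         return "end happily"
--     if any(phrase in final_sentence for phrase in ("learned", "lesson", "remembered")):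
--         return "end with a gentle lesson"
--     return "end with the problem being solved"
-- ===== SOURCE B (Python) =====
-- # Different traversal: a single left-to-right position scan over the final
-- # sentence keeping the best (lowest) matching rule priority, with early exit,
-- # instead of A's phrase-driven sequence of substring searches.
-- PHRASES = ["happily ever after", "everyone ate cake", "happy", "best friends",
--            "okay", "proud", "smile", "hug", "learned", "lesson", "remembered"]
-- LABELS = ["end with 'happily ever after'", "end with 'everyone ate cake'",
--           "end happily", "end happily", "end happily", "end happily",
--           "end happily", "end happily",
--           "end with a gentle lesson", "end with a gentle lesson",
--           "end with a gentle lesson",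
--           "end with the problem being solved"]
--
-- def infer_ending_label(story: str) -> str:
--     final_sentence = story.strip().splitlines()[-1].strip().lower()
--     if not final_sentence:
--         return "no special ending"
--     best = len(PHRASES)
--     i = 0
--     while i < len(final_sentence) and best > 0:
--         here = next((j for j, p in enumerate(PHRASES)
--                      if final_sentence.startswith(p, i)), len(PHRASES))
--         best = min(best, here)
--         i += 1
--     return LABELS[best]
-- ===== Notes on version B (the rewrite author's own statement) =====
-- stated objective: alternative
-- what changed: A runs a sequence of substring searches, one per phrase, over the last line; B makes a single left-to-right scan over the positions of the last line, at each position checking which phrases start there and keeping the lowest matching rule priority (with early exit once priority 0 is reached), then maps that priority through a label table.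
import Mathlib
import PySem

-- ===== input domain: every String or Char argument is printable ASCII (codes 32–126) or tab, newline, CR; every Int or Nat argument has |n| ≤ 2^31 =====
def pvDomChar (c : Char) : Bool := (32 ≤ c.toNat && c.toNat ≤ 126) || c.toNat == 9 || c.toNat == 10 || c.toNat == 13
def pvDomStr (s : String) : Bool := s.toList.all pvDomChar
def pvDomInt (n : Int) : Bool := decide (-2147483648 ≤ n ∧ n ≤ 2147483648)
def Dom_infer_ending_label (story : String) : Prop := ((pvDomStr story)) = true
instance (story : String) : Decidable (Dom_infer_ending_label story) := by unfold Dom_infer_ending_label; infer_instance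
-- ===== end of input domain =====

-- B replaces A's phrase-driven sequence of substring searches by a single
-- position scan over the last line that keeps the lowest matching rule priority.


-- ===== PORT A =====
def infer_ending_label (story : String) : String :=
  let stripped := PySem.Str.strip story
  let final_sentence :=
    PySem.Str.lower (PySem.Str.strip
      (PySem.List.pyGetD (PySem.Str.splitlines stripped) (-1) ""))
  if final_sentence = "" then "no special ending"
  else if PySem.Str.isIn "happily ever after" final_sentence then "end with 'happily ever after'"
  else if PySem.Str.isIn "everyone ate cake" final_sentence then "end with 'everyone ate cake'"
  else if ["happy", "best friends", "okay", "proud", "smile", "hug"].any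
      (fun phrase => PySem.Str.isIn phrase final_sentence) then "end happily"
  else if ["learned", "lesson", "remembered"].any
      (fun phrase => PySem.Str.isIn phrase final_sentence) then "end with a gentle lesson"
  else "end with the problem being solved"

-- ===== PORT B =====
def pvPhrases : List String :=
  ["happily ever after", "everyone ate cake", "happy", "best friends",
   "okay", "proud", "smile", "hug", "learned", "lesson", "remembered"]

def pvLabels : List String :=
  ["end with 'happily ever after'", "end with 'everyone ate cake'",
   "end happily", "end happily", "end happily", "end happily",
   "end happily", "end happily",
   "end with a gentle lesson", "end with a gentle lesson",
   "end with a gentle lesson",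
   "end with the problem being solved"]

-- the while loop of Source B: advance one position per step (the suffix loses its
-- head), stop at the end of the sentence or when priority 0 is reached;
-- `here` = first phrase index starting at the current position (11 if none).
def pvBest : List Char → Nat → Nat
  | [], best => best
  | c :: rest, best =>
      if best = 0 then best
      else pvBest rest
        (min best (List.findIdx (fun p => p.toList.isPrefixOf (c :: rest)) pvPhrases))

def infer_ending_label_alt (story : String) : String :=
  let final_sentence :=
    PySem.Str.lower (PySem.Str.strip
      (PySem.List.pyGetD (PySem.Str.splitlines (PySem.Str.strip story)) (-1) ""))
  if final_sentence = "" then "no special ending"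
  else pvLabels.getD (pvBest final_sentence.toList pvPhrases.length) ""

-- ===== PRECONDITION & SPEC =====
-- Pre_ excludes exactly the inputs where story.strip() is empty: there both A
-- and B raise IndexError on splitlines()[-1].
def Pre_infer_ending_label (story : String) : Prop := PySem.Str.strip story ≠ ""
instance (story : String) : Decidable (Pre_infer_ending_label story) := by unfold Pre_infer_ending_label; infer_instance
def pvWitness_infer_ending_label : String := "They were happy."

def Spec_infer_ending_label (story : String) (out : String) : Prop := out = infer_ending_label_alt story
instance (story : String) (out : String) : Decidable (Spec_infer_ending_label story out) := by unfold Spec_infer_ending_label; infer_instance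

-- ===== CLAIM (what is proved, stated in full; the proofs are below) =====
def Claim_equal_infer_ending_label : Prop := ∀ (story : String), Dom_infer_ending_label story → Pre_infer_ending_label story → Spec_infer_ending_label story (infer_ending_label story)

-- ===== LEMMAS AND PROOFS =====

-- per-phrase occurrence flags of the sentence suffix l
def pvOccs (l : List Char) : List Bool :=
  pvPhrases.map (fun p => PySem.Chars.isIn p.toList l)

def pvPrefs (l : List Char) : List Bool :=
  pvPhrases.map (fun p => p.toList.isPrefixOf l)

lemma isIn_cons (p : List Char) (c : Char) (rest : List Char) :
    PySem.Chars.isIn p (c :: rest) = (p.isPrefixOf (c :: rest) || PySem.Chars.isIn p rest) := by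
  rw [Bool.eq_iff_iff]
  simp [PySem.Chars.isIn_iff_infix, List.infix_cons_iff, List.isPrefixOf_iff_prefix]

lemma occs_cons (c : Char) (rest : List Char) :
    pvOccs (c :: rest) = List.zipWith (· || ·) (pvPrefs (c :: rest)) (pvOccs rest) := by
  simp [pvOccs, pvPrefs, pvPhrases, isIn_cons]

lemma findIdx_id_zipWith_or (as : List Bool) :
    ∀ bs : List Bool, as.length = bs.length →
    List.findIdx id (List.zipWith (· || ·) as bs)
      = min (List.findIdx id as) (List.findIdx id bs) := by
  induction as with
  | nil => intro bs h; cases bs <;> simp_all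
  | cons a as ih =>
    intro bs h
    cases bs with
    | nil => simp at h
    | cons b bs =>
      simp only [List.length_cons, Nat.succ_inj] at h
      cases a <;> cases b <;>
        simp [List.findIdx_cons, ih bs h, Nat.succ_min_succ]

lemma findIdx_occs_le (l : List Char) : List.findIdx id (pvOccs l) ≤ 11 := by
  have h := List.findIdx_le_length (p := id) (xs := pvOccs l)
  simpa [pvOccs, pvPhrases] using h

lemma pvBest_eq (l : List Char) :
    ∀ best, best ≤ 11 → pvBest l best = min best (List.findIdx id (pvOccs l)) := by
  induction l with
  | nil =>
    intro best hb
    have h : List.findIdx id (pvOccs []) = 11 := by decide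
    simp [pvBest, h]
    omega
  | cons c rest ih =>
    intro best hb
    by_cases h0 : best = 0
    · subst h0
      simp [pvBest]
    · have hhere : List.findIdx (fun p => p.toList.isPrefixOf (c :: rest)) pvPhrases
          = List.findIdx id (pvPrefs (c :: rest)) := by
        simp [pvPrefs, List.findIdx_map]
      have hlen : (pvPrefs (c :: rest)).length = (pvOccs rest).length := by
        simp [pvPrefs, pvOccs]
      rw [pvBest, if_neg h0, hhere,
        ih _ (le_trans (min_le_left _ _) hb),
        occs_cons, findIdx_id_zipWith_or _ _ hlen]
      omega

lemma pvBest_top (l : List Char) :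
    pvBest l pvPhrases.length = List.findIdx id (pvOccs l) := by
  have h := pvBest_eq l 11 (le_refl _)
  have hle := findIdx_occs_le l
  have : pvPhrases.length = 11 := by rfl
  rw [this, h]
  omega

-- the two classifications agree on every final sentence
lemma classify_eq (f : String) :
    (if f = "" then "no special ending"
     else if PySem.Str.isIn "happily ever after" f then "end with 'happily ever after'"
     else if PySem.Str.isIn "everyone ate cake" f then "end with 'everyone ate cake'"
     else if ["happy", "best friends", "okay", "proud", "smile", "hug"].any
         (fun phrase => PySem.Str.isIn phrase f) then "end happily"
     else if ["learned", "lesson", "remembered"].any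
         (fun phrase => PySem.Str.isIn phrase f) then "end with a gentle lesson"
     else "end with the problem being solved")
    = (if f = "" then "no special ending"
       else pvLabels.getD (pvBest f.toList pvPhrases.length) "") := by
  by_cases hf : f = ""
  · simp [hf]
  · rw [if_neg hf, if_neg hf, pvBest_top]
    simp only [pvOccs, pvPhrases, pvLabels, List.map, List.any_cons, List.any_nil,
      Bool.or_false, PySem.Str.isIn_eq]
    generalize PySem.Chars.isIn "happily ever after".toList f.toList = b1
    generalize PySem.Chars.isIn "everyone ate cake".toList f.toList = b2
    generalize PySem.Chars.isIn "happy".toList f.toList = c1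
    generalize PySem.Chars.isIn "best friends".toList f.toList = c2
    generalize PySem.Chars.isIn "okay".toList f.toList = c3
    generalize PySem.Chars.isIn "proud".toList f.toList = c4
    generalize PySem.Chars.isIn "smile".toList f.toList = c5
    generalize PySem.Chars.isIn "hug".toList f.toList = c6
    generalize PySem.Chars.isIn "learned".toList f.toList = d1
    generalize PySem.Chars.isIn "lesson".toList f.toList = d2
    generalize PySem.Chars.isIn "remembered".toList f.toList = d3
    revert b1 b2 c1 c2 c3 c4 c5 c6 d1 d2 d3
    decide

theorem infer_ending_label_spec : Claim_equal_infer_ending_label := by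
  intro story _ _
  unfold Spec_infer_ending_label infer_ending_label infer_ending_label_alt
  exact classify_eq _
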